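-- pv_equiv track=rewrite | github.com/darknight/algorithms | leetcode/contest_biweekly_020/p1358-number-of-substrings-containing-all-three-characters.py | AC_numberOfSubstrings
-- ===== SOURCE A (Python) =====
-- def AC_numberOfSubstrings(s: str) -> int:
--     abc = [0, 0, 0]
--     i = 0
--     while i < len(s) and (abc[0] == 0 or abc[1] == 0 or abc[2] == 0):
--         idx = ord(s[i]) - ord('a')
--         abc[idx] += 1
--         i += 1
--
--     if abc[0] == 0 or abc[1] == 0 or abc[2] == 0:
--         return 0
--
--     j = i
--     res = len(s) - j + 1
--
--     for i in range(1, len(s)):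
--         last = ord(s[i-1]) - ord('a')
--         abc[last] -= 1
--
--         while j < len(s) and (abc[0] == 0 or abc[1] == 0 or abc[2] == 0):
--             idx = ord(s[j]) - ord('a')
--             abc[idx] += 1
--             j += 1
--
--         if abc[0] == 0 or abc[1] == 0 or abc[2] == 0:
--             return res
--
--         res += len(s) - j + 1
--
--     return res
-- ===== SOURCE B (Python) =====
-- def AC_numberOfSubstrings(s: str) -> int:
--     # single pass over last occurrences: each end index contributes min(last)+1 starts
--     last = [-1, -1, -1]
--     res = 0
--     for i, ch in enumerate(s):
--         last[ord(ch) - ord('a')] = i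
--         m = min(last)
--         if m >= 0:
--             res += m + 1
--     return res
-- ===== Notes on version B (the rewrite author's own statement) =====
-- stated objective: simpler
-- what changed: Replaced A's two-pointer sliding window with per-start early returns by a single pass that tracks the last occurrence index of each of the three letters and adds min(last)+1 valid start positions for every end index.
import Mathlib
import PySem

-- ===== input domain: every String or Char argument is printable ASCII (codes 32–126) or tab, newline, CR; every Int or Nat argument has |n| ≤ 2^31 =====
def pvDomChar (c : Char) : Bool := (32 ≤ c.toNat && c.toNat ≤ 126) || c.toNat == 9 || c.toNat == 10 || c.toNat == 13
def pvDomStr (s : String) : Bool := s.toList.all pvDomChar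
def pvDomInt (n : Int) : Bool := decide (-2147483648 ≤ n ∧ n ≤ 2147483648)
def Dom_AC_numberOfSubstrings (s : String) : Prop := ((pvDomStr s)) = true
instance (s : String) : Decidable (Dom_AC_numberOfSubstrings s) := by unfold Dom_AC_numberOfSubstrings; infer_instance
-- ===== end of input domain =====

-- B replaces A's two-pointer sliding window by a single pass summing min(last-occurrence)+1 per end index; objective: simpler.


-- ===== PORT A =====
-- abc[idx] += d  (Python: read abc[idx], then store; none = IndexError)
def pvBump (abc : List Int) (idx d : Int) : Option (List Int) :=
  match PySem.List.pyGet? abc idx with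
  | none => none
  | some v => PySem.List.pySet? abc idx (v + d)

-- the loop/return condition 'abc[0] == 0 or abc[1] == 0 or abc[2] == 0' (indices 0,1,2 are in range: abc keeps length 3)
def pvMissing (abc : List Int) : Bool :=
  abc.getD 0 0 == 0 || abc.getD 1 0 == 0 || abc.getD 2 0 == 0

-- 'while j < len(s) and (abc[0] == 0 or ...): idx = ord(s[j]) - ord('a'); abc[idx] += 1; j += 1'
def pvAdvance (l : List Char) (abc : List Int) (j : Nat) : Option (List Int × Nat) :=
  if h : j < l.length ∧ pvMissing abc then
    -- s[j] with 0 ≤ j < len(s): getD's default is never read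
    match pvBump abc (((l.getD j 'a').toNat : Int) - 97) 1 with
    | none => none
    | some abc' => pvAdvance l abc' (j+1)
  else some (abc, j)
termination_by l.length - j
decreasing_by omega

-- 'for i in range(1, len(s)): …'  (state: abc, j, res)
def pvLoopA (l : List Char) (abc : List Int) (j : Nat) (res : Int) (i : Nat) : Option Int :=
  if h : i < l.length then
    -- s[i-1] with 1 ≤ i < len(s): getD's default is never read
    match pvBump abc (((l.getD (i-1) 'a').toNat : Int) - 97) (-1) with
    | none => none
    | some abc1 =>
      match pvAdvance l abc1 j with
      | none => none
      | some (abc2, j2) =>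
        if pvMissing abc2 then some res
        else pvLoopA l abc2 j2 (res + (l.length : Int) - (j2 : Int) + 1) (i+1)
  else some res
termination_by l.length - i
decreasing_by omega

def AC_numberOfSubstrings (s : String) : Int :=
  let l := s.toList
  match pvAdvance l [0, 0, 0] 0 with
  | none => 0  -- IndexError path, excluded by Pre_
  | some (abc, i) =>
    if pvMissing abc then 0
    else
      match pvLoopA l abc i ((l.length : Int) - (i : Int) + 1) 1 with
      | none => 0  -- IndexError path, excluded by Pre_
      | some r => r

-- ===== PORT B =====
-- 'for i, ch in enumerate(s): last[ord(ch)-ord('a')] = i; m = min(last); if m >= 0: res += m + 1'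
def pvLoopB (l : List Char) (last : List Int) (res : Int) (i : Nat) : Option Int :=
  if h : i < l.length then
    -- s[i] with 0 ≤ i < len(s): getD's default is never read
    match PySem.List.pySet? last (((l.getD i 'a').toNat : Int) - 97) (i : Int) with
    | none => none
    | some last' =>
      match PySem.List.min? last' (fun x => x) with
      | none => none
      | some m => pvLoopB l last' (if m ≥ 0 then res + m + 1 else res) (i+1)
  else some res
termination_by l.length - i
decreasing_by omega

def AC_numberOfSubstrings_alt (s : String) : Int :=
  match pvLoopB s.toList [-1, -1, -1] 0 0 with
  | none => 0  -- IndexError path, excluded by Pre_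
  | some r => r

-- ===== PRECONDITION & SPEC =====
-- A raises IndexError as soon as it reads a character whose code is outside 94..99 (only those codes land in
-- the 3-slot list, codes 94..96 via Python's negative-index rule), and A reads every character of s before
-- returning; Pre_ admits exactly the strings on which A returns.
def Pre_AC_numberOfSubstrings (s : String) : Prop :=
  (s.toList.all (fun c => 94 ≤ c.toNat && c.toNat ≤ 99)) = true
instance (s : String) : Decidable (Pre_AC_numberOfSubstrings s) := by
  unfold Pre_AC_numberOfSubstrings; infer_instance
def pvWitness_AC_numberOfSubstrings : String := "abcabc"

def Spec_AC_numberOfSubstrings (s : String) (out : Int) : Prop := out = AC_numberOfSubstrings_alt s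
instance (s : String) (out : Int) : Decidable (Spec_AC_numberOfSubstrings s out) := by unfold Spec_AC_numberOfSubstrings; infer_instance

-- ===== CLAIM (what is proved, stated in full; the proofs are below) =====
def Claim_equal_AC_numberOfSubstrings : Prop := ∀ (s : String), Dom_AC_numberOfSubstrings s → Pre_AC_numberOfSubstrings s → Spec_AC_numberOfSubstrings s (AC_numberOfSubstrings s)

-- ===== LEMMAS AND PROOFS =====

-- class of an admitted character: '^'/'a' ↦ 0, '_'/'b' ↦ 1, '`'/'c' ↦ 2 (Python's negative-index aliasing)
def pvCls (c : Char) : Nat := (c.toNat - 94) % 3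

-- number of indices in [p, q) ∩ [0, |l|) holding class k
def pvOcc (l : List Char) (k p : Nat) : Nat → Nat
  | 0 => 0
  | q+1 => pvOcc l k p q + (if p ≤ q ∧ q < l.length ∧ pvCls (l.getD q 'a') = k then 1 else 0)

-- the window l[p:q] contains all three classes
def pvFullB (l : List Char) (p q : Nat) : Bool :=
  decide (0 < pvOcc l 0 p q) && decide (0 < pvOcc l 1 p q) && decide (0 < pvOcc l 2 p q)

def pvTriple (l : List Char) (p q : Nat) : List Int :=
  [(pvOcc l 0 p q : Int), (pvOcc l 1 p q : Int), (pvOcc l 2 p q : Int)]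

-- per-start contribution (A's view) and per-end contribution (B's view)
def pvContribA (l : List Char) (p : Nat) : Nat :=
  ((Finset.range l.length).filter (fun e => pvFullB l p (e+1) = true)).card
def pvContribB (l : List Char) (e : Nat) : Nat :=
  ((Finset.range (e+1)).filter (fun p => pvFullB l p (e+1) = true)).card

def pvGoodL (l : List Char) : Prop := ∀ c ∈ l, 94 ≤ c.toNat ∧ c.toNat ≤ 99

lemma pvPre_good {s : String} (h : Pre_AC_numberOfSubstrings s) : pvGoodL s.toList := by
  intro c hc
  have := List.all_eq_true.mp h c hc
  simpa using this

-- last index < i of class k, as Python's -1-sentinel Int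
def pvLast (l : List Char) (k : Nat) : Nat → Int
  | 0 => -1
  | i+1 => if pvCls (l.getD i 'a') = k then (i : Int) else pvLast l k i

lemma pvOcc_zero_of_le (l : List Char) (k : Nat) {p q : Nat} (h : q ≤ p) : pvOcc l k p q = 0 := by
  induction q with
  | zero => rfl
  | succ q ih =>
    have hn : ¬ (p ≤ q ∧ q < l.length ∧ pvCls (l.getD q 'a') = k) := by
      rintro ⟨h1, _⟩; omega
    simp only [pvOcc, if_neg hn, ih (by omega)]

lemma pvOcc_mono_q (l : List Char) (k p : Nat) {q q' : Nat} (h : q ≤ q') :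
    pvOcc l k p q ≤ pvOcc l k p q' := by
  induction q', h using Nat.le_induction with
  | base => exact le_refl _
  | succ q' hq ih => simp only [pvOcc]; omega

lemma pvOcc_pos_lt {l : List Char} {k p q : Nat} (h : 0 < pvOcc l k p q) : p < q := by
  by_contra hc
  rw [pvOcc_zero_of_le l k (by omega)] at h; omega

lemma pvOcc_p_succ (l : List Char) (k p q : Nat) :
    pvOcc l k p q = pvOcc l k (p+1) q + (if p < q ∧ p < l.length ∧ pvCls (l.getD p 'a') = k then 1 else 0) := by
  induction q with
  | zero =>
    simp [pvOcc]
  | succ q ih =>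
    by_cases hq : p = q
    · subst hq
      have hz1 : pvOcc l k p p = 0 := pvOcc_zero_of_le l k (le_refl p)
      have hz2 : pvOcc l k (p+1) p = 0 := pvOcc_zero_of_le l k (Nat.le_succ p)
      have hz3 : pvOcc l k (p+1) (p+1) = 0 := pvOcc_zero_of_le l k (le_refl (p+1))
      have hn : ¬ (p+1 ≤ p ∧ p < l.length ∧ pvCls (l.getD p 'a') = k) := by rintro ⟨h1, _⟩; omega
      have he : (p ≤ p ∧ p < l.length ∧ pvCls (l.getD p 'a') = k) ↔
          (p < p+1 ∧ p < l.length ∧ pvCls (l.getD p 'a') = k) :=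
        ⟨fun ⟨h1, h2⟩ => ⟨by omega, h2⟩, fun ⟨h1, h2⟩ => ⟨by omega, h2⟩⟩
      simp only [pvOcc, hz1, hz2, if_neg hn, if_congr he rfl rfl]
    · have he1 : (p ≤ q ∧ q < l.length ∧ pvCls (l.getD q 'a') = k) ↔
          (p+1 ≤ q ∧ q < l.length ∧ pvCls (l.getD q 'a') = k) :=
        ⟨fun ⟨h1, h2⟩ => ⟨by omega, h2⟩, fun ⟨h1, h2⟩ => ⟨by omega, h2⟩⟩
      have he2 : (p < q+1 ∧ p < l.length ∧ pvCls (l.getD p 'a') = k) ↔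
          (p < q ∧ p < l.length ∧ pvCls (l.getD p 'a') = k) :=
        ⟨fun ⟨h1, h2⟩ => ⟨by omega, h2⟩, fun ⟨h1, h2⟩ => ⟨by omega, h2⟩⟩
      simp only [pvOcc, ih, if_congr he1 rfl rfl, if_congr he2 rfl rfl]
      omega

lemma pvOcc_anti_p (l : List Char) (k q : Nat) {p' p : Nat} (h : p' ≤ p) :
    pvOcc l k p q ≤ pvOcc l k p' q := by
  induction p, h using Nat.le_induction with
  | base => exact le_refl _
  | succ p hp ih =>
    have h2 := pvOcc_p_succ l k p q
    omega

lemma pvFullB_iff {l : List Char} {p q : Nat} :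
    pvFullB l p q = true ↔ 0 < pvOcc l 0 p q ∧ 0 < pvOcc l 1 p q ∧ 0 < pvOcc l 2 p q := by
  simp [pvFullB, and_assoc]

lemma pvFullB_mono_q {l : List Char} {p q q' : Nat} (h : pvFullB l p q = true) (hq : q ≤ q') :
    pvFullB l p q' = true := by
  rw [pvFullB_iff] at h ⊢
  refine ⟨?_, ?_, ?_⟩ <;>
    [have := pvOcc_mono_q l 0 p hq; have := pvOcc_mono_q l 1 p hq; have := pvOcc_mono_q l 2 p hq] <;>
    omega

lemma pvFullB_anti_p {l : List Char} {p' p q : Nat} (h : pvFullB l p q = true) (hp : p' ≤ p) :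
    pvFullB l p' q = true := by
  rw [pvFullB_iff] at h ⊢
  refine ⟨?_, ?_, ?_⟩ <;>
    [have := pvOcc_anti_p l 0 q hp; have := pvOcc_anti_p l 1 q hp; have := pvOcc_anti_p l 2 q hp] <;>
    omega

lemma pvFullB_lt {l : List Char} {p q : Nat} (h : pvFullB l p q = true) : p < q :=
  pvOcc_pos_lt (pvFullB_iff.mp h).1

lemma pvMissing_triple (l : List Char) (p q : Nat) :
    pvMissing (pvTriple l p q) = !pvFullB l p q := by
  by_cases h0 : 0 < pvOcc l 0 p q <;> by_cases h1 : 0 < pvOcc l 1 p q <;>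
    by_cases h2 : 0 < pvOcc l 2 p q <;>
    simp [pvMissing, pvTriple, pvFullB, h0, h1, h2] <;> omega

lemma pvBump_good {c : Char} (hc : 94 ≤ c.toNat ∧ c.toNat ≤ 99) (x y z d : Int) :
    pvBump [x, y, z] ((c.toNat : Int) - 97) d =
      some (if pvCls c = 0 then [x+d, y, z] else if pvCls c = 1 then [x, y+d, z] else [x, y, z+d]) := by
  have h : c.toNat = 94 ∨ c.toNat = 95 ∨ c.toNat = 96 ∨ c.toNat = 97 ∨ c.toNat = 98 ∨ c.toNat = 99 := by
    omega
  rcases h with h|h|h|h|h|h <;> rw [h] <;>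
    norm_num [pvBump, pvCls, h, PySem.List.pyGet?, PySem.List.pySet?, PySem.List.pyIdx?,
      show Int.toNat 2 = 2 from rfl]

lemma pvSet_good {c : Char} (hc : 94 ≤ c.toNat ∧ c.toNat ≤ 99) (x y z v : Int) :
    PySem.List.pySet? [x, y, z] ((c.toNat : Int) - 97) v =
      some (if pvCls c = 0 then [v, y, z] else if pvCls c = 1 then [x, v, z] else [x, y, v]) := by
  have h : c.toNat = 94 ∨ c.toNat = 95 ∨ c.toNat = 96 ∨ c.toNat = 97 ∨ c.toNat = 98 ∨ c.toNat = 99 := by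
    omega
  rcases h with h|h|h|h|h|h <;> rw [h] <;>
    norm_num [pvCls, h, PySem.List.pySet?, PySem.List.pyIdx?, show Int.toNat 2 = 2 from rfl]

lemma pvMin_three (x y z : Int) :
    PySem.List.min? [x, y, z] (fun t => t) = some (min x (min y z)) := by
  rw [PySem.List.min?_id_cons]; simp [List.foldl, min_assoc]

lemma pvCls_cases (c : Char) : pvCls c = 0 ∨ pvCls c = 1 ∨ pvCls c = 2 := by
  unfold pvCls; omega

lemma pvLast_lt (l : List Char) (k : Nat) : ∀ i, pvLast l k i < (i : Int)
  | 0 => by simp [pvLast]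
  | i+1 => by
    simp only [pvLast]
    split
    · push_cast; omega
    · have := pvLast_lt l k i; push_cast; omega

lemma pvOcc_pos_iff_last {l : List Char} (k p : Nat) :
    ∀ {i : Nat}, i ≤ l.length → (0 < pvOcc l k p i ↔ (p : Int) ≤ pvLast l k i)
  | 0, _ => by simp [pvOcc, pvLast]; omega
  | i+1, hi => by
    have ih := pvOcc_pos_iff_last (l := l) k p (i := i) (by omega)
    have hlast := pvLast_lt l k i
    by_cases hk : pvCls (l.getD i 'a') = k
    · by_cases hp : p ≤ i
      · have hcond : p ≤ i ∧ i < l.length ∧ pvCls (l.getD i 'a') = k := ⟨hp, by omega, hk⟩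
        simp only [pvOcc, pvLast, if_pos hcond, if_pos hk]
        constructor
        · intro _; exact_mod_cast Nat.cast_le.mpr hp
        · intro _; omega
      · have hcond : ¬ (p ≤ i ∧ i < l.length ∧ pvCls (l.getD i 'a') = k) := by rintro ⟨h1, _⟩; omega
        simp only [pvOcc, pvLast, if_neg hcond, if_pos hk, Nat.add_zero]
        rw [ih]
        constructor <;> intro h <;> omega
    · have hcond : ¬ (p ≤ i ∧ i < l.length ∧ pvCls (l.getD i 'a') = k) := by rintro ⟨_, _, h3⟩; omega
      simp only [pvOcc, pvLast, if_neg hcond, if_neg hk, Nat.add_zero]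
      rw [ih]

-- A's contribution of start p once its minimal full window end j2 is known
lemma pvContribA_eq {l : List Char} {p j2 : Nat} (hj2 : j2 ≤ l.length)
    (hfull : pvFullB l p j2 = true) (hmin : ∀ q < j2, pvFullB l p q = false) :
    (pvContribA l p : Int) = (l.length : Int) - (j2 : Int) + 1 := by
  have h1 : 1 ≤ j2 := by have := pvFullB_lt hfull; omega
  have hset : (Finset.range l.length).filter (fun e => pvFullB l p (e+1) = true) =
      Finset.Ico (j2 - 1) l.length := by
    ext e
    simp only [Finset.mem_filter, Finset.mem_range, Finset.mem_Ico]
    constructor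
    · rintro ⟨he, hf⟩
      refine ⟨?_, he⟩
      by_contra hc
      have : pvFullB l p (e+1) = false := hmin (e+1) (by omega)
      simp [this] at hf
    · rintro ⟨hge, hlt⟩
      exact ⟨hlt, pvFullB_mono_q hfull (by omega)⟩
  unfold pvContribA
  rw [hset, Nat.card_Ico]
  omega

lemma pvContribA_zero {l : List Char} {p : Nat} (h : ∀ q, q ≤ l.length → pvFullB l p q = false) :
    pvContribA l p = 0 := by
  unfold pvContribA
  rw [Finset.card_eq_zero, Finset.filter_eq_empty_iff]
  intro e he
  simp only [Finset.mem_range] at he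
  simp [h (e+1) (by omega)]

-- B's contribution of end e as min(last)+1
lemma pvContribB_eq {l : List Char} {e : Nat} (he : e < l.length) :
    (pvContribB l e : Int) =
      (if 0 ≤ min (pvLast l 0 (e+1)) (min (pvLast l 1 (e+1)) (pvLast l 2 (e+1)))
       then min (pvLast l 0 (e+1)) (min (pvLast l 1 (e+1)) (pvLast l 2 (e+1))) + 1 else 0) := by
  set m := min (pvLast l 0 (e+1)) (min (pvLast l 1 (e+1)) (pvLast l 2 (e+1))) with hm
  have hiff : ∀ p : Nat, pvFullB l p (e+1) = true ↔ (p : Int) ≤ m := by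
    intro p
    have h0' := pvOcc_pos_iff_last (l := l) 0 p (i := e+1) (by omega)
    have h1' := pvOcc_pos_iff_last (l := l) 1 p (i := e+1) (by omega)
    have h2' := pvOcc_pos_iff_last (l := l) 2 p (i := e+1) (by omega)
    rw [pvFullB_iff, h0', h1', h2', hm, le_min_iff, le_min_iff]
  have hmlt : m < ((e+1 : Nat) : Int) :=
    lt_of_le_of_lt (min_le_left _ _) (pvLast_lt l 0 (e+1))
  by_cases h0 : 0 ≤ m
  · have hset : (Finset.range (e+1)).filter (fun p => pvFullB l p (e+1) = true) =
        Finset.range (m.toNat + 1) := by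
      ext p
      simp only [Finset.mem_filter, Finset.mem_range, hiff]
      omega
    unfold pvContribB
    rw [hset, Finset.card_range, if_pos h0]
    push_cast
    omega
  · have hset : (Finset.range (e+1)).filter (fun p => pvFullB l p (e+1) = true) = ∅ := by
      rw [Finset.filter_eq_empty_iff]
      intro p _
      simp only [hiff]
      omega
    unfold pvContribB
    rw [hset, if_neg h0]
    simp

-- the two views count the same set of (start, end) pairs
lemma pvTotal_swap (l : List Char) :
    ∑ p ∈ Finset.range l.length, pvContribA l p = ∑ e ∈ Finset.range l.length, pvContribB l e := by
  have hA : ∀ p, pvContribA l p = ∑ e ∈ Finset.range l.length, (if pvFullB l p (e+1) = true then 1 else 0) := by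
    intro p; unfold pvContribA; rw [Finset.card_filter]
  have hB : ∀ e ∈ Finset.range l.length,
      pvContribB l e = ∑ p ∈ Finset.range l.length, (if pvFullB l p (e+1) = true then 1 else 0) := by
    intro e he
    simp only [Finset.mem_range] at he
    unfold pvContribB
    rw [Finset.card_filter]
    apply Finset.sum_subset
    · intro p hp
      simp only [Finset.mem_range] at hp ⊢
      omega
    · intro p hp hnp
      simp only [Finset.mem_range] at hp hnp
      have : ¬ pvFullB l p (e+1) = true := by
        intro hf
        have := pvFullB_lt hf
        omega
      simp [this]
  rw [Finset.sum_congr rfl hB]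
  simp only [hA]
  exact Finset.sum_comm

lemma pvAdvance_spec {l : List Char} (hg : pvGoodL l) :
    ∀ (fuel p j : Nat), l.length - j ≤ fuel → p ≤ j → j ≤ l.length →
    ∃ j2, j ≤ j2 ∧ j2 ≤ l.length ∧
      pvAdvance l (pvTriple l p j) j = some (pvTriple l p j2, j2) ∧
      (∀ q, j ≤ q → q < j2 → pvFullB l p q = false) ∧
      (pvFullB l p j2 = true ∨ j2 = l.length) := by
  intro fuel
  induction fuel with
  | zero =>
    intro p j hfuel hpj hjn
    refine ⟨j, le_refl _, hjn, ?_, by omega, Or.inr (by omega)⟩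
    rw [pvAdvance]
    have hnc : ¬ (j < l.length ∧ pvMissing (pvTriple l p j) = true) := by rintro ⟨h, _⟩; omega
    rw [dif_neg hnc]
  | succ fuel ih =>
    intro p j hfuel hpj hjn
    by_cases hcond : j < l.length ∧ pvMissing (pvTriple l p j) = true
    · obtain ⟨hjlt, hmiss⟩ := hcond
      have hfull_j : pvFullB l p j = false := by
        have hmt := pvMissing_triple l p j
        rw [hmiss] at hmt
        cases hfb : pvFullB l p j
        · rfl
        · rw [hfb] at hmt; simp at hmt
      set c := l.getD j 'a' with hc
      have hcmem : c ∈ l := by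
        rw [hc, List.getD_eq_getElem l 'a' hjlt]; exact List.getElem_mem hjlt
      have hgood := hg c hcmem
      have hstep : ∀ k : Nat, pvOcc l k p (j+1) = pvOcc l k p j + (if pvCls c = k then 1 else 0) := by
        intro k
        have hcg : (p ≤ j ∧ j < l.length ∧ pvCls (l.getD j 'a') = k) ↔ pvCls c = k :=
          ⟨fun ⟨_, _, h⟩ => by rw [← hc] at h; exact h,
           fun h => ⟨hpj, hjlt, by rw [← hc]; exact h⟩⟩
        simp only [pvOcc, if_congr hcg rfl rfl]
      have hbump : pvBump (pvTriple l p j) ((c.toNat : Int) - 97) 1 = some (pvTriple l p (j+1)) := by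
        rw [pvTriple, pvBump_good hgood]
        congr 1
        rcases pvCls_cases c with hk|hk|hk <;>
          simp [pvTriple, hk, hstep 0, hstep 1, hstep 2]
      obtain ⟨j2, h1, h2, h3, h4, h5⟩ := ih p (j+1) (by omega) (by omega) (by omega)
      refine ⟨j2, by omega, h2, ?_, ?_, h5⟩
      · rw [pvAdvance, dif_pos ⟨hjlt, hmiss⟩]
        rw [← hc]
        rw [hbump]
        exact h3
      · intro q hq1 hq2
        rcases Nat.eq_or_lt_of_le hq1 with rfl|hlt
        · exact hfull_j
        · exact h4 q (by omega) hq2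
    · refine ⟨j, le_refl _, hjn, ?_, by omega, ?_⟩
      · rw [pvAdvance, dif_neg hcond]
      · by_cases hj : j < l.length
        · left
          have hmiss : pvMissing (pvTriple l p j) = false := by
            rcases Bool.eq_false_or_eq_true (pvMissing (pvTriple l p j)) with h|h
            · exact absurd ⟨hj, h⟩ hcond
            · exact h
          have hmt := pvMissing_triple l p j
          rw [hmiss] at hmt
          cases hfb : pvFullB l p j
          · rw [hfb] at hmt; simp at hmt
          · rfl
        · exact Or.inr (by omega)

lemma pvLoopA_spec {l : List Char} (hg : pvGoodL l) :
    ∀ (fuel i j : Nat) (res : Int), l.length - i ≤ fuel → 1 ≤ i → i ≤ l.length → j ≤ l.length →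
    pvFullB l (i-1) j = true →
    (∀ q < j, pvFullB l (i-1) q = false) →
    res = ∑ p ∈ Finset.range i, (pvContribA l p : Int) →
    pvLoopA l (pvTriple l (i-1) j) j res i =
      some (∑ p ∈ Finset.range l.length, (pvContribA l p : Int)) := by
  intro fuel
  induction fuel with
  | zero =>
    intro i j res hfuel h1i hin hjn hfull hmin hres
    have hieq : i = l.length := by omega
    rw [pvLoopA, dif_neg (by omega : ¬ i < l.length), hres, hieq]
  | succ fuel ih =>
    intro i j res hfuel h1i hin hjn hfull hmin hres
    by_cases hilt : i < l.length
    · rw [pvLoopA, dif_pos hilt]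
      set c := l.getD (i-1) 'a' with hc
      have hcmem : c ∈ l := by
        rw [hc, List.getD_eq_getElem l 'a' (by omega)]; exact List.getElem_mem (by omega)
      have hgood := hg c hcmem
      have hij : i - 1 < j := pvFullB_lt hfull
      have hstep : ∀ k : Nat, pvOcc l k (i-1) j = pvOcc l k i j + (if pvCls c = k then 1 else 0) := by
        intro k
        have hps := pvOcc_p_succ l k (i-1) j
        have hi1 : i - 1 + 1 = i := by omega
        rw [hi1] at hps
        rw [hps]
        have hcg : (i-1 < j ∧ i-1 < l.length ∧ pvCls (l.getD (i-1) 'a') = k) ↔ pvCls c = k :=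
          ⟨fun ⟨_, _, h⟩ => by rw [← hc] at h; exact h,
           fun h => ⟨hij, by omega, by rw [← hc]; exact h⟩⟩
        rw [if_congr hcg rfl rfl]
      have hbump : pvBump (pvTriple l (i-1) j) ((c.toNat : Int) - 97) (-1) = some (pvTriple l i j) := by
        rw [pvTriple, pvBump_good hgood]
        congr 1
        rcases pvCls_cases c with hk|hk|hk <;>
          simp [pvTriple, hk, hstep 0, hstep 1, hstep 2]
      rw [hbump]
      simp only []
      obtain ⟨j2, hj1, hj2, hadv, hrange, hdisj⟩ :=
        pvAdvance_spec hg l.length i j (by omega) (by omega) hjn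
      rw [hadv]
      simp only []
      have hminI : ∀ q < j2, pvFullB l i q = false := by
        intro q hq
        by_cases hqj : q < j
        · cases hfb : pvFullB l i q
          · rfl
          · exfalso
            have hanti := pvFullB_anti_p hfb (show i-1 ≤ i by omega)
            rw [hmin q hqj] at hanti
            cases hanti
        · exact hrange q (by omega) hq
      by_cases hmiss : pvMissing (pvTriple l i j2) = true
      · rw [if_pos hmiss]
        have hfullI : pvFullB l i j2 = false := by
          have hmt := pvMissing_triple l i j2
          rw [hmiss] at hmt
          cases hfb : pvFullB l i j2
          · rfl
          · rw [hfb] at hmt; simp at hmt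
        have hj2n : j2 = l.length := by
          rcases hdisj with h|h
          · rw [h] at hfullI; cases hfullI
          · exact h
        rw [hres]
        congr 1
        apply Finset.sum_subset
        · intro p hp
          simp only [Finset.mem_range] at hp ⊢
          omega
        · intro p hp hnp
          simp only [Finset.mem_range] at hp hnp
          have hz : pvContribA l p = 0 := by
            apply pvContribA_zero
            intro q hq
            cases hfb : pvFullB l p q
            · rfl
            · exfalso
              have hanti := pvFullB_anti_p hfb (show i ≤ p by omega)
              by_cases hqj2 : q < j2
              · rw [hminI q hqj2] at hanti; cases hanti
              · have : q = j2 := by omega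
                rw [this] at hanti
                rw [hanti] at hfullI; cases hfullI
          rw [hz]; rfl
      · rw [if_neg hmiss]
        have hfullI : pvFullB l i j2 = true := by
          have hmt := pvMissing_triple l i j2
          have hmf : pvMissing (pvTriple l i j2) = false := by
            cases hmb : pvMissing (pvTriple l i j2)
            · rfl
            · exact absurd hmb hmiss
          rw [hmf] at hmt
          cases hfb : pvFullB l i j2
          · rw [hfb] at hmt; simp at hmt
          · rfl
        have hgoal := ih (i+1) j2 (res + (l.length : Int) - (j2 : Int) + 1)
          (by omega) (by omega) (by omega) hj2
          (by simpa using hfullI)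
          (by intro q hq; simpa using hminI q hq)
          (by rw [Finset.sum_range_succ, ← hres, pvContribA_eq hj2 hfullI hminI]; ring)
        simpa using hgoal
    · rw [pvLoopA, dif_neg hilt]
      have hieq : i = l.length := by omega
      rw [hres, hieq]

lemma pvA_eq {s : String} (h : Pre_AC_numberOfSubstrings s) :
    AC_numberOfSubstrings s = ∑ p ∈ Finset.range s.toList.length, (pvContribA s.toList p : Int) := by
  have hg : pvGoodL s.toList := pvPre_good h
  simp only [AC_numberOfSubstrings]
  have htrip : pvTriple s.toList 0 0 = [0, 0, 0] := by simp [pvTriple, pvOcc]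
  obtain ⟨j2, hj1, hj2, hadv, hrange, hdisj⟩ :=
    pvAdvance_spec hg s.toList.length 0 0 (by omega) (le_refl 0) (by omega)
  rw [← htrip, hadv]
  simp only []
  by_cases hmiss : pvMissing (pvTriple s.toList 0 j2) = true
  · rw [if_pos hmiss]
    have hfullI : pvFullB s.toList 0 j2 = false := by
      have hmt := pvMissing_triple s.toList 0 j2
      rw [hmiss] at hmt
      cases hfb : pvFullB s.toList 0 j2
      · rfl
      · rw [hfb] at hmt; simp at hmt
    have hj2n : j2 = s.toList.length := by
      rcases hdisj with hd|hd
      · rw [hd] at hfullI; cases hfullI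
      · exact hd
    symm
    apply Finset.sum_eq_zero
    intro p hp
    simp only [Finset.mem_range] at hp
    have hz : pvContribA s.toList p = 0 := by
      apply pvContribA_zero
      intro q hq
      cases hfb : pvFullB s.toList p q
      · rfl
      · exfalso
        have hanti := pvFullB_anti_p hfb (Nat.zero_le p)
        by_cases hqj2 : q < j2
        · rw [hrange q (Nat.zero_le q) hqj2] at hanti; cases hanti
        · have : q = j2 := by omega
          rw [this] at hanti
          rw [hanti] at hfullI; cases hfullI
    rw [hz]; rfl
  · rw [if_neg hmiss]
    have hfullI : pvFullB s.toList 0 j2 = true := by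
      have hmt := pvMissing_triple s.toList 0 j2
      have hmf : pvMissing (pvTriple s.toList 0 j2) = false := by
        cases hmb : pvMissing (pvTriple s.toList 0 j2)
        · rfl
        · exact absurd hmb hmiss
      rw [hmf] at hmt
      cases hfb : pvFullB s.toList 0 j2
      · rw [hfb] at hmt; simp at hmt
      · rfl
    have hj2pos : 0 < j2 := by have := pvFullB_lt hfullI; omega
    have hmin0 : ∀ q < j2, pvFullB s.toList 0 q = false :=
      fun q hq => hrange q (Nat.zero_le q) hq
    have hloop := pvLoopA_spec hg s.toList.length 1 j2
      ((s.toList.length : Int) - (j2 : Int) + 1)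
      (by omega) (le_refl 1) (by omega) hj2
      (by simpa using hfullI)
      (by intro q hq; simpa using hmin0 q hq)
      (by rw [Finset.sum_range_one, pvContribA_eq hj2 hfullI hmin0])
    rw [show pvTriple s.toList 0 j2 = pvTriple s.toList (1-1) j2 from rfl, hloop]

lemma pvLoopB_spec {l : List Char} (hg : pvGoodL l) :
    ∀ (fuel i : Nat) (res : Int), l.length - i ≤ fuel → i ≤ l.length →
    res = ∑ e ∈ Finset.range i, (pvContribB l e : Int) →
    pvLoopB l [pvLast l 0 i, pvLast l 1 i, pvLast l 2 i] res i =
      some (∑ e ∈ Finset.range l.length, (pvContribB l e : Int)) := by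
  intro fuel
  induction fuel with
  | zero =>
    intro i res hfuel hin hres
    have hieq : i = l.length := by omega
    rw [pvLoopB, dif_neg (by omega : ¬ i < l.length), hres, hieq]
  | succ fuel ih =>
    intro i res hfuel hin hres
    by_cases hilt : i < l.length
    · rw [pvLoopB, dif_pos hilt]
      set c := l.getD i 'a' with hc
      have hcmem : c ∈ l := by
        rw [hc, List.getD_eq_getElem l 'a' hilt]; exact List.getElem_mem hilt
      have hgood := hg c hcmem
      have hL : ∀ k : Nat, pvLast l k (i+1) = if pvCls c = k then (i : Int) else pvLast l k i := by
        intro k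
        simp only [pvLast, hc]
      have hset : PySem.List.pySet? [pvLast l 0 i, pvLast l 1 i, pvLast l 2 i]
          ((c.toNat : Int) - 97) (i : Int) =
          some [pvLast l 0 (i+1), pvLast l 1 (i+1), pvLast l 2 (i+1)] := by
        rw [pvSet_good hgood]
        congr 1
        rcases pvCls_cases c with hk|hk|hk <;> simp [hL, hk]
      rw [hset]
      simp only []
      rw [pvMin_three]
      simp only []
      have hcB := pvContribB_eq (l := l) (e := i) hilt
      have hstep : (if min (pvLast l 0 (i+1)) (min (pvLast l 1 (i+1)) (pvLast l 2 (i+1))) ≥ 0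
            then res + min (pvLast l 0 (i+1)) (min (pvLast l 1 (i+1)) (pvLast l 2 (i+1))) + 1
            else res) =
          res + (pvContribB l i : Int) := by
        by_cases h0 : 0 ≤ min (pvLast l 0 (i+1)) (min (pvLast l 1 (i+1)) (pvLast l 2 (i+1)))
        · rw [if_pos h0] at hcB ⊢
          rw [hcB]; ring
        · rw [if_neg h0] at hcB ⊢
          rw [hcB]; ring
      rw [hstep]
      exact ih (i+1) (res + (pvContribB l i : Int)) (by omega) (by omega)
        (by rw [Finset.sum_range_succ, hres])
    · rw [pvLoopB, dif_neg hilt]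
      have hieq : i = l.length := by omega
      rw [hres, hieq]

lemma pvB_eq {s : String} (h : Pre_AC_numberOfSubstrings s) :
    AC_numberOfSubstrings_alt s = ∑ e ∈ Finset.range s.toList.length, (pvContribB s.toList e : Int) := by
  have hg : pvGoodL s.toList := pvPre_good h
  simp only [AC_numberOfSubstrings_alt]
  have hinit : ([-1, -1, -1] : List Int) =
      [pvLast s.toList 0 0, pvLast s.toList 1 0, pvLast s.toList 2 0] := rfl
  rw [hinit, pvLoopB_spec hg s.toList.length 0 0 (by omega) (by omega) (by simp)]

-- ===== VERDICT (by name: the statement is the Claim_ definition above) =====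
theorem AC_numberOfSubstrings_spec : Claim_equal_AC_numberOfSubstrings := by
  intro s _ hpre
  unfold Spec_AC_numberOfSubstrings
  rw [pvA_eq hpre, pvB_eq hpre]
  rw [← Nat.cast_sum, ← Nat.cast_sum, pvTotal_swap]
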